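-- pv_equiv track=rewrite | github.com/thanhvanhoccode/AlgorithmPractice | 110825_removeSubStrings.py | removeSubStrings
-- ===== SOURCE A (Python) =====
-- def removeSubStrings(s):
--     chose = []
--     s1 = 0
--     for i in s:
--         if i == "1":
--             s1+=1
--         else:
--             chose.append(s1)
--             s1 = 0
--     if s1 != 0:
--         chose.append(s1)
--     chose.sort()
--     A = 0
--     B = 0
--     for i in range(len(chose)-1, -1, -2):
--         A += chose[i]
--     for i in range(len(chose)-2, -1, -2):
--         B += chose[i]
--     if A > B:
--         return [1, A]
--     return [2, B]
-- ===== SOURCE B (Python) =====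
-- def removeSubStrings(s):
--     # Counting approach: tally run lengths of consecutive '1's in a dict,
--     # then sweep lengths from largest to smallest, assigning them
--     # alternately to A and B (no sort needed).
--     cnt = {}
--     run = 0
--     for ch in s:
--         if ch == "1":
--             run += 1
--         else:
--             if run:
--                 cnt[run] = cnt.get(run, 0) + 1
--             run = 0
--     if run:
--         cnt[run] = cnt.get(run, 0) + 1
--     A = 0
--     B = 0
--     turn = True
--     for L in range(len(s), 0, -1):
--         for _ in range(cnt.get(L, 0)):
--             if turn:
--                 A += L
--             else:
--                 B += L
--             turn = not turn
--     return [1, A] if A > B else [2, B]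
-- ===== Notes on version B (the rewrite author's own statement) =====
-- stated objective: alternative
-- what changed: Replaces the sort of run lengths plus two index-stepping loops by a counting dict of run lengths and a single descending sweep over possible lengths that assigns each run alternately to A and B.
import Mathlib
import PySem

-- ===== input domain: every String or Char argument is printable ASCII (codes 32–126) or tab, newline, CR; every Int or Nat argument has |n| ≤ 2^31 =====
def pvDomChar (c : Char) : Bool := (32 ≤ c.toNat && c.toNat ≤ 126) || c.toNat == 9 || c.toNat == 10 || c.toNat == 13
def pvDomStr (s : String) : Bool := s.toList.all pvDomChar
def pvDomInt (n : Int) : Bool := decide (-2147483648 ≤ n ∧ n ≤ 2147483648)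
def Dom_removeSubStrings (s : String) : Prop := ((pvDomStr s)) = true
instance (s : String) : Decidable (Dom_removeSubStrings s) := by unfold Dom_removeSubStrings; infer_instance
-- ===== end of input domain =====

-- B replaces sorting the run lengths and two index-stepping loops by a counting
-- dict of run lengths and one descending sweep alternating between A and B
-- (alternative algorithm; not measurably faster in Python).

-- ===== PORT A =====
-- chose[i] is ported as pyGetD (default 0): every generated index is in range
-- (range(len-1,-1,-2) / range(len-2,-1,-2)), so this is exact.
def removeSubStrings (s : String) : List Int :=
  let st := s.toList.foldl
    (fun (p : List Int × Int) i =>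
      if i = '1' then (p.1, p.2 + 1) else (p.1 ++ [p.2], 0)) ([], 0)
  let chose := if st.2 ≠ 0 then st.1 ++ [st.2] else st.1
  let chose := PySem.List.sorted chose (fun x => x) false
  let A := (PySem.List.pyRange (PySem.List.len chose - 1) (-1) (-2)).foldl
      (fun A i => A + PySem.List.pyGetD chose i 0) 0
  let B := (PySem.List.pyRange (PySem.List.len chose - 2) (-1) (-2)).foldl
      (fun B i => B + PySem.List.pyGetD chose i 0) 0
  if A > B then [1, A] else [2, B]

-- ===== PORT B =====
def removeSubStrings_alt (s : String) : List Int :=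
  let st := s.toList.foldl
    (fun (p : PySem.Dict Int Int × Int) ch =>
      if ch = '1' then (p.1, p.2 + 1)
      else (if p.2 ≠ 0 then p.1.insert p.2 (p.1.getD p.2 0 + 1) else p.1, 0))
    (PySem.Dict.empty, 0)
  let cnt := if st.2 ≠ 0 then st.1.insert st.2 (st.1.getD st.2 0 + 1) else st.1
  let fin := (PySem.List.pyRange (PySem.Str.len s) 0 (-1)).foldl
      (fun (t : Int × Int × Bool) L =>
        (PySem.List.pyRange 0 (cnt.getD L 0) 1).foldl
          (fun (t : Int × Int × Bool) _ =>
            if t.2.2 then (t.1 + L, t.2.1, false) else (t.1, t.2.1 + L, true)) t)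
      (0, 0, true)
  if fin.1 > fin.2.1 then [1, fin.1] else [2, fin.2.1]

-- ===== PRECONDITION & SPEC =====
def Spec_removeSubStrings (s : String) (out : List Int) : Prop := out = removeSubStrings_alt s
instance (s : String) (out : List Int) : Decidable (Spec_removeSubStrings s out) := by unfold Spec_removeSubStrings; infer_instance

-- ===== CLAIM (what is proved, stated in full; the proofs are below) =====
def Claim_equal_removeSubStrings : Prop := ∀ (s : String), Dom_removeSubStrings s → Spec_removeSubStrings s (removeSubStrings s)

-- ===== LEMMAS AND PROOFS =====

-- the list A names `chose` before the final append, and the leftover run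
def pvChoseList : List Char → Int → List Int
  | [], _ => []
  | c :: t, cur => if c = '1' then pvChoseList t (cur + 1) else cur :: pvChoseList t 0

def pvLastRun : List Char → Int → Int
  | [], cur => cur
  | c :: t, cur => if c = '1' then pvLastRun t (cur + 1) else pvLastRun t 0

def pvChoseFull (l : List Char) : List Int :=
  pvChoseList l 0 ++ (if pvLastRun l 0 ≠ 0 then [pvLastRun l 0] else [])

-- the positive run lengths (what B counts)
def pvRuns (l : List Char) : List Int := (pvChoseFull l).filter (fun x => !(x == 0))

-- alternating sums from the front: first element to the first component
def pvG : List Int → Int × Int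
  | [] => (0, 0)
  | x :: t => (x + (pvG t).2, (pvG t).1)

-- the descending multiset B's sweep visits: lengths m, m-1, …, 1 with multiplicity
def pvDesc (R : List Int) : Nat → List Int
  | 0 => []
  | m + 1 => List.replicate (R.count ((m + 1 : Nat) : Int)) ((m + 1 : Nat) : Int) ++ pvDesc R m


def pvStep (x : Int) (t : Int × Int × Bool) : Int × Int × Bool :=
  if t.2.2 then (t.1 + x, t.2.1, false) else (t.1, t.2.1 + x, true)

theorem pvRange_neg_two_nil {a b : Int} (h : a ≤ b) :
    PySem.List.pyRange a b (-2) = [] := by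
  unfold PySem.List.pyRange
  norm_num
  intro h2
  omega

theorem pvRange_neg_two_cons {a b : Int} (h : b < a) :
    PySem.List.pyRange a b (-2) = a :: PySem.List.pyRange (a - 2) b (-2) := by
  unfold PySem.List.pyRange
  norm_num [h]
  by_cases h2 : b < a - 2
  · rw [if_pos h2]
    have hc : ((a - b + 2 - 1) / 2).toNat = ((a - 2 - b + 2 - 1) / 2).toNat + 1 := by omega
    rw [hc, List.range_succ_eq_map]
    simp only [List.map_cons, List.map_map]
    congr 1
    · norm_num
    · apply List.map_congr_left
      intro k _
      simp only [Function.comp_apply]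
      push_cast
      ring
  · rw [if_neg h2]
    have hc : ((a - b + 2 - 1) / 2).toNat = 1 := by omega
    rw [hc]
    simp

theorem pvMem_range_neg_two {a b i : Int} (h : i ∈ PySem.List.pyRange a b (-2)) :
    b < i ∧ i ≤ a := by
  unfold PySem.List.pyRange at h
  norm_num at h
  by_cases hba : b < a
  · rw [if_pos hba] at h
    obtain ⟨k, hk, hes⟩ := h
    omega
  · rw [if_neg hba] at h
    simp at h

theorem pvFoldA_eq (l : List Char) (acc : List Int) (cur : Int) :
    l.foldl (fun (p : List Int × Int) i =>
      if i = '1' then (p.1, p.2 + 1) else (p.1 ++ [p.2], 0)) (acc, cur)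
    = (acc ++ pvChoseList l cur, pvLastRun l cur) := by
  induction l generalizing acc cur with
  | nil => simp [pvChoseList, pvLastRun]
  | cons c t ih =>
    by_cases hc : c = '1' <;> simp [pvChoseList, pvLastRun, hc, ih]

theorem pvFoldB_eq (l : List Char) (d : PySem.Dict Int Int) (cur : Int) :
    l.foldl (fun (p : PySem.Dict Int Int × Int) ch =>
      if ch = '1' then (p.1, p.2 + 1)
      else (if p.2 ≠ 0 then p.1.insert p.2 (p.1.getD p.2 0 + 1) else p.1, 0)) (d, cur)
    = (((pvChoseList l cur).filter (fun x => !(x == 0))).foldl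
        (fun d x => d.insert x (d.getD x 0 + 1)) d, pvLastRun l cur) := by
  induction l generalizing d cur with
  | nil => simp [pvChoseList, pvLastRun]
  | cons c t ih =>
    rw [List.foldl_cons]
    by_cases hc : c = '1'
    · rw [if_pos hc]
      rw [ih]
      simp [pvChoseList, pvLastRun, hc]
    · rw [if_neg hc]
      by_cases hz : cur = 0
      · rw [if_neg (by simp [hz])]
        rw [ih]
        simp [pvChoseList, pvLastRun, hc, hz]
      · rw [if_pos (by simp [hz])]
        rw [ih]
        simp [pvChoseList, pvLastRun, hc, hz]

theorem pvBounds (l : List Char) (cur : Int) (h : 0 ≤ cur) :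
    (∀ x ∈ pvChoseList l cur, 0 ≤ x ∧ x ≤ cur + l.length)
    ∧ (0 ≤ pvLastRun l cur ∧ pvLastRun l cur ≤ cur + l.length) := by
  induction l generalizing cur with
  | nil => simp [pvChoseList, pvLastRun]; omega
  | cons c t ih =>
    by_cases hc : c = '1'
    · obtain ⟨h1, h2, h3⟩ := ih (cur + 1) (by omega)
      simp only [pvChoseList, pvLastRun, if_pos hc, List.length_cons]
      refine ⟨fun x hx => ?_, ?_, ?_⟩
      · have := h1 x hx; push_cast at *; omega
      · omega
      · push_cast at *; omega
    · obtain ⟨h1, h2, h3⟩ := ih 0 (by omega)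
      simp only [pvChoseList, pvLastRun, if_neg hc, List.length_cons]
      refine ⟨fun x hx => ?_, ?_, ?_⟩
      · rcases List.mem_cons.mp hx with hx | hx
        · subst hx; push_cast; omega
        · have := h1 x hx; push_cast at *; omega
      · omega
      · push_cast at *; omega

theorem pvRuns_bounds (l : List Char) (x : Int) (h : x ∈ pvRuns l) :
    1 ≤ x ∧ x ≤ (l.length : Int) := by
  have hb := pvBounds l 0 le_rfl
  unfold pvRuns pvChoseFull at h
  rw [List.mem_filter] at h
  obtain ⟨hm, hnz⟩ := h
  simp at hnz
  rw [List.mem_append] at hm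
  rcases hm with hm | hm
  · have := hb.1 x hm
    omega
  · by_cases hz : pvLastRun l 0 = 0
    · simp [hz] at hm
    · simp [hz] at hm
      subst hm
      have := hb.2
      omega

theorem pvG_replicate_zero (z : Nat) : pvG (List.replicate z 0) = (0, 0) := by
  induction z with
  | zero => rfl
  | succ n ih => simp [List.replicate_succ, pvG, ih]

theorem pvG_append_nil (v w : List Int) (hw : pvG w = (0, 0)) :
    pvG (v ++ w) = pvG v := by
  induction v with
  | nil => simpa using hw
  | cons x t ih => simp [pvG, ih]

theorem pvAlt_eq (v : List Int) (A B : Int) (t : Bool) :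
    ((v.foldl (fun t x => pvStep x t) (A, B, t)).1,
     (v.foldl (fun t x => pvStep x t) (A, B, t)).2.1)
    = if t then (A + (pvG v).1, B + (pvG v).2) else (A + (pvG v).2, B + (pvG v).1) := by
  induction v generalizing A B t with
  | nil => cases t <;> simp [pvG]
  | cons x w ih =>
    cases t with
    | false =>
      have hs : pvStep x (A, B, false) = (A, B + x, true) := by simp [pvStep]
      rw [List.foldl_cons, hs, ih]
      simp [pvG, add_assoc]
    | true =>
      have hs : pvStep x (A, B, true) = (A + x, B, false) := by simp [pvStep]
      rw [List.foldl_cons, hs, ih]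
      simp [pvG, add_assoc]

theorem pvDesc_mem (R : List Int) (m : Nat) (x : Int) (h : x ∈ pvDesc R m) :
    1 ≤ x ∧ x ≤ (m : Int) := by
  induction m with
  | zero => simp [pvDesc] at h
  | succ n ih =>
    simp only [pvDesc, List.mem_append] at h
    rcases h with h | h
    · have := List.eq_of_mem_replicate h
      subst this
      push_cast
      omega
    · have := ih h
      push_cast at *
      omega

theorem pvDesc_pairwise (R : List Int) (m : Nat) :
    (pvDesc R m).Pairwise (fun a b => b ≤ a) := by
  induction m with
  | zero => simp [pvDesc]
  | succ n ih =>
    simp only [pvDesc]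
    rw [List.pairwise_append]
    refine ⟨List.pairwise_replicate.mpr (by simp), ih, ?_⟩
    intro a ha b hb
    have ha' := List.eq_of_mem_replicate ha
    have hb' := pvDesc_mem R n b hb
    subst ha'
    push_cast at *
    omega

theorem pvDesc_count (R : List Int) (m : Nat) (v : Int) :
    (pvDesc R m).count v = if 1 ≤ v ∧ v ≤ (m : Int) then R.count v else 0 := by
  induction m with
  | zero => simp [pvDesc]; omega
  | succ n ih =>
    simp only [pvDesc, List.count_append, ih]
    by_cases hv : v = ((n + 1 : Nat) : Int)
    · subst hv
      rw [List.count_replicate_self, if_neg (by push_cast; omega),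
        if_pos (by push_cast; omega)]
      omega
    · rw [List.count_replicate, if_neg (by simpa using Ne.symm hv)]
      split_ifs with h1 h2 <;> push_cast at * <;> omega

theorem pvDesc_perm (R : List Int) (m : Nat) (hb : ∀ x ∈ R, 1 ≤ x ∧ x ≤ (m : Int)) :
    (pvDesc R m).Perm R := by
  rw [List.perm_iff_count]
  intro v
  rw [pvDesc_count]
  split_ifs with h
  · rfl
  · symm
    rw [List.count_eq_zero]
    intro hv
    exact h (hb v hv)

theorem pvFilter_zero_eq_replicate (l : List Int) :
    l.filter (fun x => x == 0) = List.replicate (l.count 0) 0 := by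
  induction l with
  | nil => simp
  | cons x t ih =>
    by_cases hx : x = 0
    · subst hx
      simp [ih, List.replicate_succ]
    · simp [hx, ih]

theorem pvRuns_split (l : List Char) :
    pvRuns l = (pvChoseList l 0).filter (fun x => !(x == 0))
      ++ (if pvLastRun l 0 ≠ 0 then [pvLastRun l 0] else []) := by
  unfold pvRuns pvChoseFull
  rw [List.filter_append]
  by_cases hz : pvLastRun l 0 = 0 <;> simp [hz]

theorem pvCnt_getD (l : List Char) (v : Int) :
    (let st := l.foldl (fun (p : PySem.Dict Int Int × Int) ch =>
      if ch = '1' then (p.1, p.2 + 1)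
      else (if p.2 ≠ 0 then p.1.insert p.2 (p.1.getD p.2 0 + 1) else p.1, 0))
      (PySem.Dict.empty, 0);
     (if st.2 ≠ 0 then st.1.insert st.2 (st.1.getD st.2 0 + 1) else st.1).getD v 0)
    = ((pvRuns l).count v : Int) := by
  rw [pvFoldB_eq]
  rw [pvRuns_split]
  by_cases hz : pvLastRun l 0 = 0
  · simp only [hz, ne_eq, not_true_eq_false, if_false]
    simp [PySem.Dict.getD_foldl_insert_add_one]
  · simp only [hz, ne_eq, not_false_eq_true, if_true]
    set d0 := ((pvChoseList l 0).filter (fun x => !(x == 0))).foldl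
      (fun d x => d.insert x (d.getD x 0 + 1)) (PySem.Dict.empty : PySem.Dict Int Int) with hd0
    have h1 := PySem.Dict.getD_foldl_insert_add_one [pvLastRun l 0] d0 v
    simp only [List.foldl_cons, List.foldl_nil] at h1
    rw [h1, hd0, PySem.Dict.getD_foldl_insert_add_one]
    rw [List.count_append]
    simp

theorem pvGetD_append (l : List Int) (x : Int) (i : Int) (h0 : 0 ≤ i) (h1 : i < l.length) :
    PySem.List.pyGetD (l ++ [x]) i 0 = PySem.List.pyGetD l i 0 := by
  rw [PySem.List.pyGetD_eq_getElem _ _ h0 (by simp; omega),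
    PySem.List.pyGetD_eq_getElem _ _ h0 (by exact_mod_cast h1)]
  rw [List.getElem_append_left]

theorem pvSum_eq (l : List Int) :
    ((PySem.List.pyRange ((l.length : Int) - 1) (-1) (-2)).foldl
        (fun A i => A + PySem.List.pyGetD l i 0) 0 = (pvG l.reverse).1)
    ∧ ((PySem.List.pyRange ((l.length : Int) - 2) (-1) (-2)).foldl
        (fun A i => A + PySem.List.pyGetD l i 0) 0 = (pvG l.reverse).2) := by
  induction l using List.reverseRecOn with
  | nil =>
    rw [pvRange_neg_two_nil (by norm_num), pvRange_neg_two_nil (by norm_num)]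
    simp [pvG]
  | append_singleton l x ih =>
    have hlen : ((l ++ [x]).length : Int) = (l.length : Int) + 1 := by simp
    have hgrev : pvG ((l ++ [x]).reverse) = (x + (pvG l.reverse).2, (pvG l.reverse).1) := by
      simp [List.reverse_append, pvG]
    constructor
    · rw [hlen, hgrev]
      have ha : (l.length : Int) + 1 - 1 = (l.length : Int) := by ring
      rw [ha, pvRange_neg_two_cons (by omega)]
      simp only [List.foldl_cons]
      have hx : (0 : Int) + PySem.List.pyGetD (l ++ [x]) (l.length : Int) 0 = x := by
        rw [PySem.List.pyGetD_eq_getElem _ _ (by omega) (by simp)]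
        simp
      rw [hx]
      rw [PySem.List.foldl_congr_mem _ _ (fun A i => A + PySem.List.pyGetD l i 0) _ ?_]
      · have ih2 := ih.2
        rw [PySem.List.foldl_add] at ih2
        rw [PySem.List.foldl_add]
        omega
      · intro acc i hi
        have hb := pvMem_range_neg_two hi
        rw [pvGetD_append l x i (by omega) (by omega)]
    · rw [hlen, hgrev]
      have ha : (l.length : Int) + 1 - 2 = (l.length : Int) - 1 := by ring
      rw [ha]
      rw [PySem.List.foldl_congr_mem _ _ (fun A i => A + PySem.List.pyGetD l i 0) _ ?_]
      · exact ih.1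
      · intro acc i hi
        have hb := pvMem_range_neg_two hi
        rw [pvGetD_append l x i (by omega) (by omega)]

theorem pvInner_eq (L : Int) (k : Nat) (st : Int × Int × Bool) :
    (PySem.List.pyRange 0 (k : Int) 1).foldl (fun t _ => pvStep L t) st
    = (List.replicate k L).foldl (fun t x => pvStep x t) st := by
  induction k generalizing st with
  | zero => rw [PySem.List.pyRange_one_eq_nil (by norm_num)]; rfl
  | succ n ih =>
    have hcast : ((n + 1 : Nat) : Int) = (n : Int) + 1 := by push_cast; ring
    rw [hcast, PySem.List.pyRange_one_succ_right (by positivity),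
      List.replicate_succ', List.foldl_append, List.foldl_append, ih]
    rfl

theorem pvOuter_eq (R : List Int) (cnt : PySem.Dict Int Int)
    (hc : ∀ v, cnt.getD v 0 = (R.count v : Int)) (m : Nat) (st : Int × Int × Bool) :
    (PySem.List.pyRange (m : Int) 0 (-1)).foldl
      (fun t L => (PySem.List.pyRange 0 (cnt.getD L 0) 1).foldl (fun t _ => pvStep L t) t) st
    = (pvDesc R m).foldl (fun t x => pvStep x t) st := by
  induction m generalizing st with
  | zero => rw [PySem.List.pyRange_neg_one_eq_nil (by norm_num)]; rfl
  | succ n ih =>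
    have h1 : ((n + 1 : Nat) : Int) - 1 = (n : Int) := by push_cast; ring
    rw [PySem.List.pyRange_neg_one_cons (by positivity), List.foldl_cons, h1]
    simp only [pvDesc, List.foldl_append]
    rw [← ih]
    congr 1
    rw [hc, pvInner_eq]

theorem pvSorted_chose (l : List Char) :
    PySem.List.sorted (pvChoseFull l) (fun x => x) false
    = List.replicate ((pvChoseFull l).count 0) 0 ++ (pvDesc (pvRuns l) l.length).reverse := by
  apply PySem.List.sorted_id_eq_of_perm_of_pairwise
  · rw [← pvFilter_zero_eq_replicate]
    refine List.Perm.trans (List.Perm.append_left _ ?_) (List.filter_append_perm _ _)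
    exact (List.reverse_perm _).trans
      (pvDesc_perm _ _ (fun x hx => pvRuns_bounds l x hx))
  · rw [List.pairwise_append]
    refine ⟨List.pairwise_replicate.mpr (by simp), ?_, ?_⟩
    · rw [List.pairwise_reverse]
      exact pvDesc_pairwise _ _
    · intro a ha b hb
      have ha' := List.eq_of_mem_replicate ha
      have hb' := pvDesc_mem _ _ b (List.mem_reverse.mp hb)
      omega

theorem pvOuter_eq' (R : List Int) (cnt : PySem.Dict Int Int)
    (hc : ∀ v, cnt.getD v 0 = (R.count v : Int)) (m : Nat) (st : Int × Int × Bool) :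
    (PySem.List.pyRange (m : Int) 0 (-1)).foldl
      (fun (t : Int × Int × Bool) L =>
        (PySem.List.pyRange 0 (cnt.getD L 0) 1).foldl
          (fun (t : Int × Int × Bool) _ =>
            if t.2.2 then (t.1 + L, t.2.1, false) else (t.1, t.2.1 + L, true)) t) st
    = (pvDesc R m).foldl (fun t x => pvStep x t) st :=
  pvOuter_eq R cnt hc m st

theorem removeSubStrings_spec : Claim_equal_removeSubStrings := by
  unfold Claim_equal_removeSubStrings Spec_removeSubStrings
  intro s _hdom
  unfold removeSubStrings removeSubStrings_alt
  dsimp only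
  rw [pvFoldA_eq]
  simp only [List.nil_append]
  have hch : (if pvLastRun s.toList 0 ≠ 0
        then pvChoseList s.toList 0 ++ [pvLastRun s.toList 0]
        else pvChoseList s.toList 0) = pvChoseFull s.toList := by
    unfold pvChoseFull
    by_cases h : pvLastRun s.toList 0 = 0 <;> simp [h]
  rw [hch, pvSorted_chose]
  have hlen : PySem.Str.len s = (s.toList.length : Int) := by
    simp [pysem]
  rw [hlen,
    pvOuter_eq' (pvRuns s.toList) _ (fun v => pvCnt_getD s.toList v) s.toList.length]
  set X := pvDesc (pvRuns s.toList) s.toList.length with hX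
  set z := (pvChoseFull s.toList).count 0 with hz
  have hlistlen : PySem.List.len (List.replicate z 0 ++ X.reverse)
      = ((List.replicate z 0 ++ X.reverse).length : Int) := by
    simp [pysem]
  rw [hlistlen]
  have hrev : (List.replicate z 0 ++ X.reverse).reverse = X ++ List.replicate z 0 := by
    simp
  have hA := (pvSum_eq (List.replicate z 0 ++ X.reverse)).1
  have hB := (pvSum_eq (List.replicate z 0 ++ X.reverse)).2
  rw [hrev, pvG_append_nil X _ (pvG_replicate_zero z)] at hA hB
  rw [hA, hB]
  have hAB := pvAlt_eq X 0 0 true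
  rw [if_pos rfl] at hAB
  have h1 : (X.foldl (fun t x => pvStep x t) (0, 0, true)).1 = (pvG X).1 := by
    have := congrArg Prod.fst hAB
    simpa using this
  have h2 : (X.foldl (fun t x => pvStep x t) (0, 0, true)).2.1 = (pvG X).2 := by
    have := congrArg Prod.snd hAB
    simpa using this
  rw [h1, h2]
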